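-- pv_equiv track=rewrite | github.com/DL-SCA/Deep-Learning-Based-Side-Channel-Attack-on-MT-TMVP | software/generate_inputs.py | compute_tmvp_reference
-- ===== SOURCE A (Python) =====
-- from typing import List, Tuple
--
-- def compute_tmvp_reference(f: List[int], g: List[int]) -> List[int]:
--     """Compute TMVP result in software for verification."""
--     n = len(f)
--     result = []
--     for i in range(n):
--         acc = 0
--         for j in range(n):
--             idx = (i - j) % n
--             if i < j:
--                 idx = n - (j - i)
--             acc += f[idx] * g[j]
--         result.append(acc & 0xFF)
--     return result
-- ===== SOURCE B (Python) =====
-- def compute_tmvp_reference(f, g):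
--     """Circular convolution accumulated by rotating f once per g-coefficient; bytes at the end."""
--     n = len(f)
--     acc = [0] * n
--     rot = list(f)
--     for gj in g[:n]:
--         acc = [a + r * gj for a, r in zip(acc, rot)]
--         rot = rot[-1:] + rot[:-1]
--     return [a & 0xFF for a in acc]
-- ===== Notes on version B (the rewrite author's own statement) =====
-- stated objective: alternative
-- what changed: B replaces A's per-entry modular index arithmetic (nested i/j loops with (i-j)%n) by a single fold over the g-coefficients that keeps a running accumulator vector and a right-rotated copy of f, masking to bytes once at the end.
import Mathlib
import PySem

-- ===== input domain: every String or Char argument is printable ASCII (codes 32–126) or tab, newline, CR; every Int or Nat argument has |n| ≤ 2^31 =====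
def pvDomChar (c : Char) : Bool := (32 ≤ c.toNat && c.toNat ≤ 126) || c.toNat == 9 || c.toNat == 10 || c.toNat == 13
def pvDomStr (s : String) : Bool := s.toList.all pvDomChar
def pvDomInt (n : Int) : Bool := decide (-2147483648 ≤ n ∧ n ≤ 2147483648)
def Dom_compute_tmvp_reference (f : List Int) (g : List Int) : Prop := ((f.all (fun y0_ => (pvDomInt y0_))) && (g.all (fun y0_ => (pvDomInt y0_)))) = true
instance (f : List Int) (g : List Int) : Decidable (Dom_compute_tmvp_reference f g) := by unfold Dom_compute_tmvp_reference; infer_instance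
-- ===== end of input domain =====

-- B computes the same circular convolution by rotating f once per g-coefficient instead of
-- per-entry modular index arithmetic (objective: alternative, same O(n^2) cost).

-- ===== PORT A =====
-- literal transliteration of A: outer loop over i, inner loop over j, modular index, byte mask
def compute_tmvp_reference (f : List Int) (g : List Int) : List Int :=
  let n : Int := f.length
  (PySem.List.pyRange 0 n 1).foldl (fun result i =>
    let acc := (PySem.List.pyRange 0 n 1).foldl (fun acc j =>
      let idx := PySem.Int.mod (i - j) n
      let idx := if i < j then n - (j - i) else idx
      acc + PySem.List.pyGetD f idx 0 * PySem.List.pyGetD g j 0) 0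
    result ++ [PySem.Int.band acc 0xFF]) []

-- ===== PORT B =====
-- literal transliteration of B: fold over g[:n] keeping (acc, rot); zip-update acc, rotate rot right
def compute_tmvp_reference_alt (f : List Int) (g : List Int) : List Int :=
  let n := f.length
  let st := (PySem.List.slice g (some 0) (some (n : Int))).foldl
    (fun (st : List Int × List Int) gj =>
      ((st.1.zip st.2).map (fun p => p.1 + p.2 * gj),
       PySem.List.slice st.2 (some (-1)) none ++ PySem.List.slice st.2 none (some (-1))))
    (List.replicate n 0, f)
  st.1.map (fun a => PySem.Int.band a 0xFF)

-- ===== PRECONDITION & SPEC =====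
-- A indexes g[j] for every j < len(f): when len(g) < len(f) it raises IndexError, excluded here.
def Pre_compute_tmvp_reference (f : List Int) (g : List Int) : Prop := f.length ≤ g.length
instance (f : List Int) (g : List Int) : Decidable (Pre_compute_tmvp_reference f g) := by
  unfold Pre_compute_tmvp_reference; infer_instance
def pvWitness_compute_tmvp_reference : List Int × List Int := ([1, 2], [3, 4])

def Spec_compute_tmvp_reference (f : List Int) (g : List Int) (out : List Int) : Prop := out = compute_tmvp_reference_alt f g
instance (f : List Int) (g : List Int) (out : List Int) : Decidable (Spec_compute_tmvp_reference f g out) := by unfold Spec_compute_tmvp_reference; infer_instance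

-- ===== CLAIM (what is proved, stated in full; the proofs are below) =====
def Claim_equal_compute_tmvp_reference : Prop := ∀ (f : List Int) (g : List Int), Dom_compute_tmvp_reference f g → Pre_compute_tmvp_reference f g → Spec_compute_tmvp_reference f g (compute_tmvp_reference f g)

-- ===== LEMMAS AND PROOFS =====

-- circular access to f, with an Int argument reduced modulo len f
def fcZ (f : List Int) (t : Int) : Int :=
  f.getD (PySem.Int.mod t (f.length : Int)).toNat 0

theorem fcZ_congr (f : List Int) {t t' : Int} (h : t' = t + (f.length : Int)) :
    fcZ f t' = fcZ f t := by
  unfold fcZ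
  rcases Nat.eq_zero_or_pos f.length with h0 | h0
  · simp [List.length_eq_zero_iff.mp h0]
  · have hp : (0 : Int) < (f.length : Int) := by exact_mod_cast h0
    rw [PySem.Int.mod_eq_emod_of_pos hp, PySem.Int.mod_eq_emod_of_pos hp, h,
      Int.add_emod_right]

theorem mod_small (f : List Int) {t : Int} (h0 : 0 ≤ t) (h1 : t < (f.length : Int)) :
    PySem.Int.mod t (f.length : Int) = t := by
  have hp : (0 : Int) < (f.length : Int) := by omega
  rw [PySem.Int.mod_eq_emod_of_pos hp]
  exact Int.emod_eq_of_lt h0 h1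

-- A's per-entry index (with its redundant override) is just fcZ (i - j)
theorem idx_eq (f : List Int) {i j : Int} (hi0 : 0 ≤ i) (_hi : i < (f.length : Int))
    (hj0 : 0 ≤ j) (hj : j < (f.length : Int)) :
    PySem.List.pyGetD f (if i < j then (f.length : Int) - (j - i) else PySem.Int.mod (i - j) (f.length : Int)) 0
      = fcZ f (i - j) := by
  have hp : (0 : Int) < (f.length : Int) := by omega
  have hval : (if i < j then (f.length : Int) - (j - i) else PySem.Int.mod (i - j) (f.length : Int))
      = PySem.Int.mod (i - j) (f.length : Int) := by
    split_ifs with hlt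
    · rw [PySem.Int.mod_eq_emod_of_pos hp, ← Int.add_emod_right,
        Int.emod_eq_of_lt (by omega) (by omega)]
      omega
    · rfl
  rw [hval]
  unfold fcZ
  have h0 : 0 ≤ PySem.Int.mod (i - j) (f.length : Int) := PySem.Int.mod_nonneg _ hp
  have : PySem.Int.mod (i - j) (f.length : Int) = ((PySem.Int.mod (i - j) (f.length : Int)).toNat : Int) := by omega
  rw [this, PySem.List.pyGetD_natCast]
  have hmax : max (PySem.Int.mod (i - j) (f.length : Int)) 0 = PySem.Int.mod (i - j) (f.length : Int) := by omega
  simp [hmax]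

-- A as a map of sums
theorem portA_eq (f g : List Int) :
    compute_tmvp_reference f g
      = (List.range f.length).map (fun (i : Nat) =>
          PySem.Int.band
            (((List.range f.length).map (fun (j : Nat) =>
                fcZ f ((i : Int) - (j : Int)) * g.getD j 0)).sum) 255) := by
  unfold compute_tmvp_reference
  dsimp only
  rw [PySem.List.pyRange_zero_nat, List.foldl_map, PySem.List.foldl_append_singleton_eq_map]
  simp only [List.nil_append]
  refine List.map_congr_left (fun i _hi => ?_)
  have hi' := List.mem_range.mp _hi
  rw [List.foldl_map, PySem.List.foldl_add]
  simp only [zero_add]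
  congr 1
  congr 1
  refine List.map_congr_left (fun j hj => ?_)
  have hj' := List.mem_range.mp hj
  rw [idx_eq f (Int.natCast_nonneg i) (by exact_mod_cast hi') (Int.natCast_nonneg j) (by exact_mod_cast hj'),
    PySem.List.pyGetD_natCast]

-- xs[-1:] and xs[:-1] as drop/take
theorem slice_last (xs : List Int) (h : xs ≠ []) :
    PySem.List.slice xs (some (-1)) none = xs.drop (xs.length - 1) := by
  have hl : 1 ≤ xs.length := List.length_pos_iff.mpr h
  have he : ((xs.length : Int) + -1).toNat = xs.length - 1 := by omega
  simp [PySem.List.slice, PySem.List.clampIdx, h, he]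

theorem slice_init (xs : List Int) :
    PySem.List.slice xs none (some (-1)) = xs.take (xs.length - 1) := by
  simp [PySem.List.slice, PySem.List.clampIdx]
  split_ifs with h
  · simp [h]
  · have hne : xs ≠ [] := by simpa using h
    have hl : 1 ≤ xs.length := List.length_pos_iff.mpr hne
    have he : ((xs.length : Int) + -1).toNat = xs.length - 1 := by omega
    rw [he]; omega

-- the right-rotation step on a list presented as a map over range n
theorem rot_step (n : Nat) (b : Nat → Int) :
    PySem.List.slice ((List.range n).map b) (some (-1)) none
      ++ PySem.List.slice ((List.range n).map b) none (some (-1))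
      = (List.range n).map (fun i => if i = 0 then b (n - 1) else b (i - 1)) := by
  cases n with
  | zero => simp [PySem.List.slice]
  | succ m =>
    have hne : (List.range (m + 1)).map b ≠ [] := by simp
    rw [slice_last _ hne, slice_init]
    have hlen : ((List.range (m + 1)).map b).length = m + 1 := by simp
    rw [hlen]
    simp only [Nat.add_sub_cancel]
    have hsplit : (List.range (m + 1)).map b = (List.range m).map b ++ [b m] := by
      rw [List.range_succ, List.map_append]; rfl
    have hlm : ((List.range m).map b).length = m := by simp
    rw [hsplit, List.drop_left' hlm, List.take_left' hlm]
    rw [List.range_succ_eq_map, List.map_cons, List.map_map]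
    simp

-- the loop invariant for B's fold
theorem b_inv (f : List Int) (gs : List Int) : ∀ (k : Nat) (A : Nat → Int),
    gs.foldl (fun (st : List Int × List Int) gj =>
        ((st.1.zip st.2).map (fun p => p.1 + p.2 * gj),
         PySem.List.slice st.2 (some (-1)) none ++ PySem.List.slice st.2 none (some (-1))))
      ((List.range f.length).map A, (List.range f.length).map (fun (i : Nat) => fcZ f ((i : Int) - k)))
    = ((List.range f.length).map (fun (i : Nat) => A i +
          ((List.range gs.length).map (fun (j : Nat) => fcZ f ((i : Int) - k - j) * gs.getD j 0)).sum),
       (List.range f.length).map (fun (i : Nat) => fcZ f ((i : Int) - k - gs.length))) := by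
  induction gs with
  | nil => intro k A; simp
  | cons gj rest ih =>
    intro k A
    rw [List.foldl_cons]
    have hfst : ((((List.range f.length).map A).zip
          ((List.range f.length).map (fun (i : Nat) => fcZ f ((i : Int) - k)))).map
            (fun p => p.1 + p.2 * gj))
        = (List.range f.length).map (fun (i : Nat) => A i + fcZ f ((i : Int) - k) * gj) := by
      rw [List.zip_map', List.map_map]
      rfl
    have hsnd : (PySem.List.slice ((List.range f.length).map (fun (i : Nat) => fcZ f ((i : Int) - k))) (some (-1)) none
          ++ PySem.List.slice ((List.range f.length).map (fun (i : Nat) => fcZ f ((i : Int) - k))) none (some (-1)))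
        = (List.range f.length).map (fun (i : Nat) => fcZ f ((i : Int) - ((k + 1 : Nat) : Int))) := by
      rw [rot_step]
      refine List.map_congr_left (fun i hi => ?_)
      have hi' := List.mem_range.mp hi
      by_cases h0 : i = 0
      · simp only [h0, if_true]
        have hn : 1 ≤ f.length := by omega
        refine fcZ_congr f ?_
        push_cast [hn]
        ring
      · simp only [if_neg h0]
        have h1 : 1 ≤ i := Nat.one_le_iff_ne_zero.mpr h0
        congr 1
        push_cast [h1]
        ring
    simp only [hfst, hsnd]
    rw [ih (k + 1) (fun i => A i + fcZ f ((i : Int) - k) * gj)]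
    rw [Prod.mk.injEq]
    refine ⟨?_, ?_⟩
    · refine List.map_congr_left (fun i _hi => ?_)
      rw [List.length_cons, List.range_succ_eq_map, List.map_cons, List.map_map, List.sum_cons]
      simp only [Function.comp_def, List.getD_cons_zero, List.getD_cons_succ, Nat.cast_zero,
        sub_zero]
      have hs : (List.range rest.length).map
            (fun (j : Nat) => fcZ f ((i : Int) - ((k + 1 : Nat) : Int) - (j : Int)) * rest.getD j 0)
          = (List.range rest.length).map
            (fun (j : Nat) => fcZ f ((i : Int) - (k : Int) - ((j + 1 : Nat) : Int)) * rest.getD j 0) := by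
        refine List.map_congr_left (fun j _ => ?_)
        congr 2
        push_cast
        ring
      rw [hs]
      ring
    · refine List.map_congr_left (fun i _hi => ?_)
      congr 1
      simp only [List.length_cons]
      push_cast
      ring

-- ===== VERDICT (by name: the statement is the Claim_ definition above) =====
theorem compute_tmvp_reference_spec : Claim_equal_compute_tmvp_reference := by
  intro f g _hd hpre
  unfold Pre_compute_tmvp_reference at hpre
  unfold Spec_compute_tmvp_reference
  have hslice : PySem.List.slice g (some 0) (some (f.length : Int)) = g.take f.length := by
    rw [PySem.List.slice]
    simp [PySem.List.clampIdx]
    split_ifs <;> omega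
  have hrepl : (List.replicate f.length (0 : Int))
      = (List.range f.length).map (fun (_ : Nat) => (0 : Int)) := by
    simp [List.map_const']
  have hself : f = (List.range f.length).map (fun (i : Nat) => fcZ f ((i : Int) - ((0 : Nat) : Int))) := by
    refine List.ext_getElem (by simp) (fun i hi hi2 => ?_)
    simp only [List.getElem_map, List.getElem_range]
    have hi' : i < f.length := hi
    unfold fcZ
    rw [Int.natCast_zero, sub_zero, mod_small f (Int.natCast_nonneg i) (by exact_mod_cast hi')]
    simp [List.getD_eq_getElem?_getD, List.getElem?_eq_getElem hi']
  have hbi := b_inv f (g.take f.length) 0 (fun _ => 0)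
  rw [← hself, ← hrepl] at hbi
  rw [portA_eq]
  unfold compute_tmvp_reference_alt
  dsimp only
  rw [hslice, hbi]
  dsimp only
  rw [List.map_map]
  have hlen : (g.take f.length).length = f.length := by simp [hpre]
  simp only [hlen, Function.comp_def, zero_add]
  refine List.map_congr_left (fun i _hi => ?_)
  congr 1
  refine congrArg _ (List.map_congr_left (fun j hj => ?_))
  have hj' := List.mem_range.mp hj
  have hgd : (g.take f.length).getD j 0 = g.getD j 0 := by
    simp [List.getD_eq_getElem?_getD, List.getElem?_take_of_lt hj']
  rw [hgd]
  norm_num
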